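-- pv_equiv track=rewrite | github.com/whyj107/CodeWar | 20221226_Zero count in product.py | zero_count1
-- ===== SOURCE A (Python) =====
-- def zero_count1(sum):
--     res = []
--     max_zeros = 1
--     for a in range(0, sum//3+1):
--         for b in range(a, (sum-a)//2+1):
--             c = sum - a - b
--             prod = a * b * c
--             zeros = 0
--             while prod % 10 == 0:
--                 zeros += 1
--                 prod //= 10
--                 if prod == 0:
--                     break
--             if zeros == max_zeros:
--                 res.append([a,b,c])
--             elif zeros > max_zeros:
--                 res = [[a,b,c]]
--                 max_zeros = zeros
--     return res
-- ===== SOURCE B (Python) =====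
-- def zero_count1(sum):
--     # two-pass: first find the maximal zero count over all triples, then
--     # re-enumerate and keep exactly the triples attaining it (same order)
--     def tz(p):
--         if p == 0:
--             return 1
--         z = 0
--         while p % 10 == 0:
--             z += 1
--             p //= 10
--         return z
--     m = max((tz(a * b * (sum - a - b))
--              for a in range(0, sum // 3 + 1)
--              for b in range(a, (sum - a) // 2 + 1)), default=None)
--     if m is None:
--         return []
--     return [[a, b, sum - a - b]
--             for a in range(0, sum // 3 + 1)
--             for b in range(a, (sum - a) // 2 + 1)
--             if tz(a * b * (sum - a - b)) == m]
-- ===== Notes on version B (the rewrite author's own statement) =====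
-- stated objective: alternative
-- what changed: A streams a running max with reset-on-improvement in a single accumulation; B makes two passes: it first collects every triple with its trailing-zero count, then takes the maximum of the counts and filters the triples that attain it, preserving order.
import Mathlib
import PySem

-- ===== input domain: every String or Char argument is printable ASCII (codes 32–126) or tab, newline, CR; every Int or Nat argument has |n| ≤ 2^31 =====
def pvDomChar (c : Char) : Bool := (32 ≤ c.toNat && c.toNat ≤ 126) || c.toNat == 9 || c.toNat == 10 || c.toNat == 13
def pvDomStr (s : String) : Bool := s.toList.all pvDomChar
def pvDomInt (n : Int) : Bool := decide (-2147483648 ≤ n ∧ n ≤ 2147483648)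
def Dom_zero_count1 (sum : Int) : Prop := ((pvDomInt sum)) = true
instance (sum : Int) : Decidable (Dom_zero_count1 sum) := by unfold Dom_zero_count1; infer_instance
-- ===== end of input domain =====

-- B restructures A's streaming running-max-with-reset accumulation into two passes (collect all
-- triples with their zero counts, then take the max and filter); objective: alternative decomposition.

-- termination helper for the two while-loops (cited by decreasing_by)
theorem pvNatAbsFloordivLt (p : Int) (hm : PySem.Int.mod p 10 = 0) (hp : p ≠ 0) :
    (PySem.Int.floordiv p 10).natAbs < p.natAbs := by
  obtain ⟨k, hk⟩ := (PySem.Int.mod_eq_zero_iff_dvd p 10).mp hm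
  have hd : PySem.Int.floordiv p 10 = k := by
    rw [hk, PySem.Int.floordiv_eq_ediv_of_pos (by norm_num), Int.mul_ediv_cancel_left k (by norm_num)]
  have hk0 : k ≠ 0 := by rintro rfl; simp at hk; exact hp hk
  rw [hd, hk, Int.natAbs_mul]
  have h1 : 1 ≤ k.natAbs := Int.natAbs_pos.mpr hk0
  show k.natAbs < 10 * k.natAbs
  omega

-- ===== PORT A =====
-- the inner 'while prod % 10 == 0: zeros += 1; prod //= 10; if prod == 0: break' loop
def loopZ (prod : Int) (zeros : Int) : Int :=
  if hm : PySem.Int.mod prod 10 = 0 then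
    let zeros' := zeros + 1
    let prod' := PySem.Int.floordiv prod 10
    if hz : prod' = 0 then zeros' else loopZ prod' zeros'
  else zeros
termination_by prod.natAbs
decreasing_by
  exact pvNatAbsFloordivLt prod hm (by rintro rfl; exact hz (by decide))

def zero_count1 (sum : Int) : List (List Int) :=
  let st := (PySem.List.pyRange 0 (PySem.Int.floordiv sum 3 + 1) 1).foldl
    (fun st a =>
      (PySem.List.pyRange a (PySem.Int.floordiv (sum - a) 2 + 1) 1).foldl
        (fun st b =>
          let c := sum - a - b
          let prod := a * b * c
          let zeros := loopZ prod 0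
          if zeros = st.2 then (st.1 ++ [[a, b, c]], st.2)
          else if zeros > st.2 then ([[a, b, c]], zeros)
          else st)
        st)
    (([] : List (List Int)), (1 : Int))
  st.1

-- ===== PORT B =====
-- tz's 'while p % 10 == 0' loop; the 'p ≠ 0' guard only makes the recursion total
-- (tz reaches the loop only with p ≠ 0, and 10 ∣ p keeps the quotient ≠ 0)
def tzLoop (p : Int) (z : Int) : Int :=
  if h : p ≠ 0 ∧ PySem.Int.mod p 10 = 0 then tzLoop (PySem.Int.floordiv p 10) (z + 1) else z
termination_by p.natAbs
decreasing_by exact pvNatAbsFloordivLt p h.2 h.1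

def tzAlt (p : Int) : Int := if p = 0 then 1 else tzLoop p 0

def zero_count1_alt (sum : Int) : List (List Int) :=
  let zs := (PySem.List.pyRange 0 (PySem.Int.floordiv sum 3 + 1) 1).flatMap
    (fun a => (PySem.List.pyRange a (PySem.Int.floordiv (sum - a) 2 + 1) 1).map
      (fun b => tzAlt (a * b * (sum - a - b))))
  match PySem.List.max? zs (fun y => y) with
  | none => []
  | some m =>
    (PySem.List.pyRange 0 (PySem.Int.floordiv sum 3 + 1) 1).flatMap
      (fun a => ((PySem.List.pyRange a (PySem.Int.floordiv (sum - a) 2 + 1) 1).filter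
          (fun b => tzAlt (a * b * (sum - a - b)) = m)).map
        (fun b => [a, b, sum - a - b]))

-- ===== PRECONDITION & SPEC =====
def Spec_zero_count1 (sum : Int) (out : List (List Int)) : Prop := out = zero_count1_alt sum
instance (sum : Int) (out : List (List Int)) : Decidable (Spec_zero_count1 sum out) := by unfold Spec_zero_count1; infer_instance

-- ===== CLAIM (what is proved, stated in full; the proofs are below) =====
def Claim_equal_zero_count1 : Prop := ∀ (sum : Int), Dom_zero_count1 sum → Spec_zero_count1 sum (zero_count1 sum)

-- ===== LEMMAS AND PROOFS =====

-- the list of triples both programs enumerate, the zero count and the output row of a triple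
def pvL (sum : Int) : List (Int × Int × Int) :=
  (PySem.List.pyRange 0 (PySem.Int.floordiv sum 3 + 1) 1).flatMap
    (fun a => (PySem.List.pyRange a (PySem.Int.floordiv (sum - a) 2 + 1) 1).map
      (fun b => (a, b, sum - a - b)))
def pvZ (t : Int × Int × Int) : Int := loopZ (t.1 * t.2.1 * t.2.2) 0
def pvOut (t : Int × Int × Int) : List Int := [t.1, t.2.1, t.2.2]

theorem loopZ_zero (z : Int) : loopZ 0 z = z + 1 := by
  rw [loopZ, dif_pos (by decide : PySem.Int.mod 0 10 = 0)]
  exact dif_pos (by decide : PySem.Int.floordiv 0 10 = 0)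

-- A's break-loop equals B's tz loop off 0
theorem loopZ_eq_tzLoop : ∀ (n : Nat) (p z : Int), p.natAbs = n → p ≠ 0 → loopZ p z = tzLoop p z := by
  intro n
  induction n using Nat.strong_induction_on with
  | _ n ih =>
    intro p z hn hp
    rw [loopZ, tzLoop]
    by_cases hm : PySem.Int.mod p 10 = 0
    · rw [dif_pos hm, dif_pos (show p ≠ 0 ∧ PySem.Int.mod p 10 = 0 from ⟨hp, hm⟩)]
      by_cases hz : PySem.Int.floordiv p 10 = 0
      · rw [dif_pos hz, tzLoop, dif_neg (fun hcon => hcon.1 hz)]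
      · rw [dif_neg hz]
        exact ih _ (hn ▸ pvNatAbsFloordivLt p hm hp) _ _ rfl hz
    · rw [dif_neg hm, dif_neg (fun h => hm h.2)]

theorem loopZ_eq_tzAlt (p : Int) : loopZ p 0 = tzAlt p := by
  by_cases hp : p = 0
  · subst hp; rw [loopZ_zero, tzAlt, if_pos rfl]; norm_num
  · rw [tzAlt, if_neg hp]; exact loopZ_eq_tzLoop p.natAbs p 0 rfl hp

-- the generic streaming running-max-with-reset fold, characterised as filter-by-max
theorem stream_eq {α β : Type} (z : α → Int) (out : α → β) (m0 : Int) (P : List α) :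
    P.foldl (fun st t => if z t = st.2 then (st.1 ++ [out t], st.2)
                         else if z t > st.2 then ([out t], z t) else st) (([] : List β), m0)
    = ((P.filter (fun t => z t = P.foldl (fun acc t => max acc (z t)) m0)).map out,
       P.foldl (fun acc t => max acc (z t)) m0) := by
  induction P using List.reverseRecOn with
  | nil => simp
  | append_singleton P t ihP =>
    have hub := (PySem.List.le_foldl_max_int P z m0).2
    simp only [List.foldl_append, List.foldl_cons, List.foldl_nil, ihP, List.filter_append,
      List.map_append]
    set M := P.foldl (fun acc t => max acc (z t)) m0 with hMdef
    rcases lt_trichotomy (z t) M with hlt | heq | hgt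
    · have hmax : max M (z t) = M := by omega
      rw [if_neg (by omega), if_neg (by omega)]
      simp only [hmax, List.filter_cons, List.filter_nil]
      rw [if_neg (by simpa using hlt.ne)]
      simp
    · have hmax : max M (z t) = M := by omega
      rw [if_pos heq]
      simp only [hmax, List.filter_cons, List.filter_nil]
      rw [if_pos (by simpa using heq)]
      simp
    · have hmax : max M (z t) = z t := by omega
      rw [if_neg (by omega), if_pos hgt]
      simp only [hmax, List.filter_cons, List.filter_nil]
      rw [if_pos (by simp)]
      have hnil : P.filter (fun t' => decide (z t' = z t)) = [] := by
        rw [List.filter_eq_nil_iff]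
        intro t' ht'
        have := hub t' ht'
        simp only [decide_eq_true_eq]
        omega
      simp [hnil]

-- A as filter-by-max over the flat triple list
theorem A_char (sum : Int) : zero_count1 sum
    = ((pvL sum).filter (fun t => pvZ t
          = (pvL sum).foldl (fun acc t => max acc (pvZ t)) 1)).map pvOut := by
  have h : zero_count1 sum
      = ((pvL sum).foldl (fun st t => if pvZ t = st.2 then (st.1 ++ [pvOut t], st.2)
            else if pvZ t > st.2 then ([pvOut t], pvZ t) else st)
          (([] : List (List Int)), (1 : Int))).1 := by
    unfold zero_count1 pvL
    rw [List.foldl_flatMap]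
    simp only [List.foldl_map]
    rfl
  rw [h, stream_eq]

-- the flat triple list is empty for negative sum …
theorem pvL_nil (sum : Int) (h : sum < 0) : pvL sum = [] := by
  unfold pvL
  rw [PySem.List.pyRange_one_eq_nil (by
    have := (PySem.Int.floordiv_lt_iff_lt_mul (a := sum) (q := 0) (by norm_num : (0:Int) < 3)).mpr
      (by omega)
    omega)]
  rfl

-- … and starts with the triple (0, 0, sum) for nonnegative sum
theorem pvL_cons (sum : Int) (h : 0 ≤ sum) :
    ∃ rest, pvL sum = (0, 0, sum) :: rest := by
  unfold pvL
  have h3 : (0:Int) < PySem.Int.floordiv sum 3 + 1 := by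
    have := (PySem.Int.le_floordiv_iff_mul_le (a := sum) (q := 0) (by norm_num : (0:Int) < 3)).mpr
      (by omega)
    omega
  have h2 : (0:Int) < PySem.Int.floordiv (sum - 0) 2 + 1 := by
    have := (PySem.Int.le_floordiv_iff_mul_le (a := sum - 0) (q := 0) (by norm_num : (0:Int) < 2)).mpr
      (by omega)
    omega
  have e : sum - 0 - 0 = sum := by ring
  rw [PySem.List.pyRange_one_cons h3, List.flatMap_cons, PySem.List.pyRange_one_cons h2,
    List.map_cons, List.cons_append, e]
  exact ⟨_, rfl⟩


-- B's zero-count comprehension is the map of pvZ over the flat triple list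
theorem B_zs (sum : Int) :
    (PySem.List.pyRange 0 (PySem.Int.floordiv sum 3 + 1) 1).flatMap
      (fun a => (PySem.List.pyRange a (PySem.Int.floordiv (sum - a) 2 + 1) 1).map
        (fun b => tzAlt (a * b * (sum - a - b))))
    = (pvL sum).map pvZ := by
  unfold pvL
  rw [List.map_flatMap]
  congr 1
  funext a
  rw [List.map_map]
  exact List.map_congr_left (fun b _ => by
    rw [← loopZ_eq_tzAlt]; rfl)

-- B's filtering comprehension is filter-then-map over the flat triple list
theorem B_filter (sum m : Int) :
    (PySem.List.pyRange 0 (PySem.Int.floordiv sum 3 + 1) 1).flatMap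
      (fun a => ((PySem.List.pyRange a (PySem.Int.floordiv (sum - a) 2 + 1) 1).filter
          (fun b => tzAlt (a * b * (sum - a - b)) = m)).map
        (fun b => [a, b, sum - a - b]))
    = ((pvL sum).filter (fun t => pvZ t = m)).map pvOut := by
  unfold pvL
  rw [List.filter_flatMap, List.map_flatMap]
  congr 1
  funext a
  rw [List.filter_map, List.map_map]
  congr 1
  apply List.filter_congr
  intro b _
  rw [← loopZ_eq_tzAlt]; rfl

-- ===== VERDICT (by name: the statement is the Claim_ definition above) =====
theorem zero_count1_spec : Claim_equal_zero_count1 := by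
  intro sum _
  unfold Spec_zero_count1
  have hB : zero_count1_alt sum
      = (match PySem.List.max? ((pvL sum).map pvZ) (fun y => y) with
         | none => []
         | some m =>
           (PySem.List.pyRange 0 (PySem.Int.floordiv sum 3 + 1) 1).flatMap
             (fun a => ((PySem.List.pyRange a (PySem.Int.floordiv (sum - a) 2 + 1) 1).filter
                 (fun b => tzAlt (a * b * (sum - a - b)) = m)).map
               (fun b => [a, b, sum - a - b]))) := by
    unfold zero_count1_alt
    rw [B_zs]
  rcases lt_or_ge sum 0 with hneg | hpos
  · rw [A_char, hB, pvL_nil sum hneg]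
    simp [PySem.List.max?]
  · obtain ⟨rest, hL⟩ := pvL_cons sum hpos
    have hz0 : pvZ (0, 0, sum) = 1 := by
      unfold pvZ
      rw [show ((0:Int), (0:Int), sum).1 * ((0:Int), (0:Int), sum).2.1 * ((0:Int), (0:Int), sum).2.2
        = 0 by ring, loopZ_zero]
      norm_num
    rw [A_char, hB, hL]
    simp only [List.map_cons, hz0, PySem.List.max?_id_cons, List.foldl_cons, List.foldl_map,
      max_self]
    rw [B_filter, hL]
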